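-- pv_equiv track=rewrite | github.com/wesleybertipaglia/rom-organizer | api/game_missing.py | _classify_by_region
-- ===== SOURCE A (Python) =====
-- def _classify_by_region(games):
--     regions = {
--         "World": [],
--         "USA": [],
--         "Europe": [],
--         "Japan": [],
--         "Taiwan": [],
--         "Hong Kong": [],
--         "Korea": [],
--         "Asia": [],
--         "China": [],
--         "Others": []
--     }
--
--     for game in games:
--         name_lower = game.lower()
--
--         if "usa" in name_lower:
--             regions["USA"].append(game)
--         elif "europe" in name_lower or "eur" in name_lower:
--             regions["Europe"].append(game)
--         elif "japan" in name_lower or "jpn" in name_lower: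
--             regions["Japan"].append(game)
--         elif "world" in name_lower:
--             regions["World"].append(game)
--         elif "asia" in name_lower:
--             regions["Asia"].append(game)
--         elif "taiwan" in name_lower:
--             regions["Taiwan"].append(game)
--         elif "hong kong" in name_lower:
--             regions["Hong Kong"].append(game)
--         elif "korea" in name_lower:
--             regions["Korea"].append(game)
--         elif "china" in name_lower:
--             regions["China"].append(game)
--         else:
--             regions["Others"].append(game)
--
--     return regions
-- ===== SOURCE B (Python) =====
-- _SIEVE = [
--     ("USA", ("usa",)),
--     ("Europe", ("europe", "eur")),
--     ("Japan", ("japan", "jpn")),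
--     ("World", ("world",)),
--     ("Asia", ("asia",)),
--     ("Taiwan", ("taiwan",)),
--     ("Hong Kong", ("hong kong",)),
--     ("Korea", ("korea",)),
--     ("China", ("china",)),
-- ]
--
-- _KEY_ORDER = ["World", "USA", "Europe", "Japan", "Taiwan",
--               "Hong Kong", "Korea", "Asia", "China", "Others"]
--
--
-- def _classify_by_region(games):
--     # Region-major sieve: each stage claims its games and passes the rest on.
--     remaining = [(g, g.lower()) for g in games]
--     buckets = {}
--     for region, kws in _SIEVE:
--         buckets[region] = [g for g, low in remaining
--                            if any(k in low for k in kws)]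
--         remaining = [(g, low) for g, low in remaining
--                      if not any(k in low for k in kws)]
--     buckets["Others"] = [g for g, _ in remaining]
--     return {key: buckets[key] for key in _KEY_ORDER}
-- ===== Notes on version B (the rewrite author's own statement) =====
-- stated objective: alternative
-- what changed: Replaces A's game-major if/elif ladder mutating a pre-built dict with a region-major sieve: each region stage filters its games out of a shrinking remainder list (priority comes from staging order, not branch order), leftovers become 'Others', and the buckets are reassembled in the original key order.
import Mathlib
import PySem

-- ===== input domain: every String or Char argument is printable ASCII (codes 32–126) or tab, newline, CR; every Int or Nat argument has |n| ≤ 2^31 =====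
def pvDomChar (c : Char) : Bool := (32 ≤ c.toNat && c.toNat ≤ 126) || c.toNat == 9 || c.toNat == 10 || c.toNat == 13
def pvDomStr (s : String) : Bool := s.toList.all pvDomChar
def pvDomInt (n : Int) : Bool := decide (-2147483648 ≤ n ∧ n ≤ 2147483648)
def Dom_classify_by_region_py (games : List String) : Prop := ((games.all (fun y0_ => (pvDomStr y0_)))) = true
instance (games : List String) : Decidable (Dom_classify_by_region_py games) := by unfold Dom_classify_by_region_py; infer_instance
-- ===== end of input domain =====

-- B replaces A's game-major if/elif ladder with a region-major sieve: each region stage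
-- filters its games out of a shrinking remainder list, priority arising from staging
-- order rather than branch order (objective: alternative decomposition, same cost).

-- ===== PORT A =====
-- one loop iteration of A's for-loop (the if/elif ladder appending to the dict's bucket)
def stepA (regions : PySem.Dict String (List String)) (game : String) : PySem.Dict String (List String) :=
  let name_lower := PySem.Str.lower game
  if PySem.Str.isIn "usa" name_lower then regions.modify "USA" [] (fun l => l ++ [game])
  else if PySem.Str.isIn "europe" name_lower || PySem.Str.isIn "eur" name_lower then regions.modify "Europe" [] (fun l => l ++ [game])
  else if PySem.Str.isIn "japan" name_lower || PySem.Str.isIn "jpn" name_lower then regions.modify "Japan" [] (fun l => l ++ [game])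
  else if PySem.Str.isIn "world" name_lower then regions.modify "World" [] (fun l => l ++ [game])
  else if PySem.Str.isIn "asia" name_lower then regions.modify "Asia" [] (fun l => l ++ [game])
  else if PySem.Str.isIn "taiwan" name_lower then regions.modify "Taiwan" [] (fun l => l ++ [game])
  else if PySem.Str.isIn "hong kong" name_lower then regions.modify "Hong Kong" [] (fun l => l ++ [game])
  else if PySem.Str.isIn "korea" name_lower then regions.modify "Korea" [] (fun l => l ++ [game])
  else if PySem.Str.isIn "china" name_lower then regions.modify "China" [] (fun l => l ++ [game])
  else regions.modify "Others" [] (fun l => l ++ [game])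

def classify_by_region_py (games : List String) : List (String × List String) :=
  let regions : PySem.Dict String (List String) := PySem.Dict.mk
    [("World", []), ("USA", []), ("Europe", []), ("Japan", []), ("Taiwan", []),
     ("Hong Kong", []), ("Korea", []), ("Asia", []), ("China", []), ("Others", [])]
  (games.foldl stepA regions).items

-- ===== PORT B =====
-- 'any(k in low for k in kws)'
def kwHit (kws : List String) (low : String) : Bool := kws.any (fun k => PySem.Str.isIn k low)

def sieveTable : List (String × List String) :=
  [("USA", ["usa"]), ("Europe", ["europe", "eur"]), ("Japan", ["japan", "jpn"]),
   ("World", ["world"]), ("Asia", ["asia"]), ("Taiwan", ["taiwan"]),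
   ("Hong Kong", ["hong kong"]), ("Korea", ["korea"]), ("China", ["china"])]

def keyOrder : List String :=
  ["World", "USA", "Europe", "Japan", "Taiwan", "Hong Kong", "Korea", "Asia", "China", "Others"]

-- Source B's for-loop over _SIEVE: each stage emits its bucket and shrinks `remaining`;
-- after the last stage the leftovers become the "Others" bucket.
def sieveAux : List (String × List String) → List (String × String) → List (String × List String)
  | [], remaining => [("Others", remaining.map Prod.fst)]
  | (region, kws) :: rest, remaining =>
      (region, (remaining.filter (fun p => kwHit kws p.2)).map Prod.fst) ::
      sieveAux rest (remaining.filter (fun p => !kwHit kws p.2))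

def classify_by_region_py_alt (games : List String) : List (String × List String) :=
  let buckets := sieveAux sieveTable (games.map (fun g => (g, PySem.Str.lower g)))
  keyOrder.map (fun key => (key, ((buckets.find? (fun p => p.1 == key)).map Prod.snd).getD []))

-- ===== PRECONDITION & SPEC =====
def Spec_classify_by_region_py (games : List String) (out : List (String × List String)) : Prop := out = classify_by_region_py_alt games
instance (games : List String) (out : List (String × List String)) : Decidable (Spec_classify_by_region_py games out) := by unfold Spec_classify_by_region_py; infer_instance

-- ===== CLAIM (what is proved, stated in full; the proofs are below) =====
def Claim_equal_classify_by_region_py : Prop := ∀ (games : List String), Dom_classify_by_region_py games → Spec_classify_by_region_py games (classify_by_region_py games)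

-- ===== LEMMAS AND PROOFS =====
def regionOfAux (low : String) : List (String × List String) → String
  | [] => "Others"
  | (region, kws) :: rest => if kwHit kws low then region else regionOfAux low rest

def regionOf (game : String) : String := regionOfAux (PySem.Str.lower game) sieveTable

def mkRegions (w u e j t hk k a c o : List String) : PySem.Dict String (List String) :=
  PySem.Dict.mk
    [("World", w), ("USA", u), ("Europe", e), ("Japan", j), ("Taiwan", t),
     ("Hong Kong", hk), ("Korea", k), ("Asia", a), ("China", c), ("Others", o)]

theorem items_mkRegions (w u e j t hk k a c o : List String) :
    (mkRegions w u e j t hk k a c o).items =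
      [("World", w), ("USA", u), ("Europe", e), ("Japan", j), ("Taiwan", t),
       ("Hong Kong", hk), ("Korea", k), ("Asia", a), ("China", c), ("Others", o)] := rfl

theorem stepA_eq (d : PySem.Dict String (List String)) (g : String) :
    stepA d g = d.modify (regionOf g) [] (fun l => l ++ [g]) := by
  simp only [stepA, regionOf, sieveTable, regionOfAux, kwHit, List.any_cons, List.any_nil,
    Bool.or_false, Bool.or_eq_true]
  split_ifs <;> rfl

theorem regionOf_cases (g : String) :
    regionOf g = "USA" ∨ regionOf g = "Europe" ∨ regionOf g = "Japan" ∨ regionOf g = "World" ∨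
    regionOf g = "Asia" ∨ regionOf g = "Taiwan" ∨ regionOf g = "Hong Kong" ∨
    regionOf g = "Korea" ∨ regionOf g = "China" ∨ regionOf g = "Others" := by
  simp only [regionOf, sieveTable, regionOfAux]
  split_ifs <;> simp

theorem modify_mk_world (w u e j t hk k a c o : List String) (f : List String → List String) :
    (mkRegions w u e j t hk k a c o).modify "World" [] f = mkRegions (f w) u e j t hk k a c o := rfl
theorem modify_mk_usa (w u e j t hk k a c o : List String) (f : List String → List String) :
    (mkRegions w u e j t hk k a c o).modify "USA" [] f = mkRegions w (f u) e j t hk k a c o := rfl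
theorem modify_mk_europe (w u e j t hk k a c o : List String) (f : List String → List String) :
    (mkRegions w u e j t hk k a c o).modify "Europe" [] f = mkRegions w u (f e) j t hk k a c o := rfl
theorem modify_mk_japan (w u e j t hk k a c o : List String) (f : List String → List String) :
    (mkRegions w u e j t hk k a c o).modify "Japan" [] f = mkRegions w u e (f j) t hk k a c o := rfl
theorem modify_mk_taiwan (w u e j t hk k a c o : List String) (f : List String → List String) :
    (mkRegions w u e j t hk k a c o).modify "Taiwan" [] f = mkRegions w u e j (f t) hk k a c o := rfl
theorem modify_mk_hongkong (w u e j t hk k a c o : List String) (f : List String → List String) :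
    (mkRegions w u e j t hk k a c o).modify "Hong Kong" [] f = mkRegions w u e j t (f hk) k a c o := rfl
theorem modify_mk_korea (w u e j t hk k a c o : List String) (f : List String → List String) :
    (mkRegions w u e j t hk k a c o).modify "Korea" [] f = mkRegions w u e j t hk (f k) a c o := rfl
theorem modify_mk_asia (w u e j t hk k a c o : List String) (f : List String → List String) :
    (mkRegions w u e j t hk k a c o).modify "Asia" [] f = mkRegions w u e j t hk k (f a) c o := rfl
theorem modify_mk_china (w u e j t hk k a c o : List String) (f : List String → List String) :
    (mkRegions w u e j t hk k a c o).modify "China" [] f = mkRegions w u e j t hk k a (f c) o := rfl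
theorem modify_mk_others (w u e j t hk k a c o : List String) (f : List String → List String) :
    (mkRegions w u e j t hk k a c o).modify "Others" [] f = mkRegions w u e j t hk k a c (f o) := rfl

theorem classify_inv (games : List String) (w u e j t hk k a c o : List String) :
    (games.foldl stepA (mkRegions w u e j t hk k a c o)).items =
      [("World", w ++ games.filter (fun g => regionOf g == "World")),
       ("USA", u ++ games.filter (fun g => regionOf g == "USA")),
       ("Europe", e ++ games.filter (fun g => regionOf g == "Europe")),
       ("Japan", j ++ games.filter (fun g => regionOf g == "Japan")),
       ("Taiwan", t ++ games.filter (fun g => regionOf g == "Taiwan")),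
       ("Hong Kong", hk ++ games.filter (fun g => regionOf g == "Hong Kong")),
       ("Korea", k ++ games.filter (fun g => regionOf g == "Korea")),
       ("Asia", a ++ games.filter (fun g => regionOf g == "Asia")),
       ("China", c ++ games.filter (fun g => regionOf g == "China")),
       ("Others", o ++ games.filter (fun g => regionOf g == "Others"))] := by
  induction games generalizing w u e j t hk k a c o with
  | nil => simp [items_mkRegions]
  | cons g gs ih =>
      rw [List.foldl_cons, stepA_eq]
      rcases regionOf_cases g with hr | hr | hr | hr | hr | hr | hr | hr | hr | hr
      · rw [hr, modify_mk_usa, ih]; simp [hr]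
      · rw [hr, modify_mk_europe, ih]; simp [hr]
      · rw [hr, modify_mk_japan, ih]; simp [hr]
      · rw [hr, modify_mk_world, ih]; simp [hr]
      · rw [hr, modify_mk_asia, ih]; simp [hr]
      · rw [hr, modify_mk_taiwan, ih]; simp [hr]
      · rw [hr, modify_mk_hongkong, ih]; simp [hr]
      · rw [hr, modify_mk_korea, ih]; simp [hr]
      · rw [hr, modify_mk_china, ih]; simp [hr]
      · rw [hr, modify_mk_others, ih]; simp [hr]

theorem regionOfAux_mem (low : String) (tbl : List (String × List String)) :
    regionOfAux low tbl = "Others" ∨ regionOfAux low tbl ∈ tbl.map Prod.fst := by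
  induction tbl with
  | nil => left; rfl
  | cons rk rest ih =>
      obtain ⟨r, kws⟩ := rk
      simp only [regionOfAux]
      split_ifs with h
      · right; simp
      · rcases ih with h' | h'
        · left; exact h'
        · right; simp [h']

theorem sieve_spec (tbl : List (String × List String)) (rem : List String)
    (hnd : (tbl.map Prod.fst).Nodup) (hoth : "Others" ∉ tbl.map Prod.fst) :
    sieveAux tbl (rem.map (fun g => (g, PySem.Str.lower g))) =
      tbl.map (fun rk => (rk.1, rem.filter (fun g => regionOfAux (PySem.Str.lower g) tbl == rk.1)))
      ++ [("Others", rem.filter (fun g => regionOfAux (PySem.Str.lower g) tbl == "Others"))] := by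
  induction tbl generalizing rem with
  | nil =>
      simp only [sieveAux, regionOfAux, List.map_nil, List.nil_append, List.map_map]
      rw [show (Prod.fst ∘ fun g : String => (g, PySem.Str.lower g)) = id from rfl, List.map_id]
      simp
  | cons rk rest ih =>
      obtain ⟨r, kws⟩ := rk
      have hcons : (r :: rest.map Prod.fst).Nodup := by simpa using hnd
      have hrrest : r ∉ rest.map Prod.fst := (List.nodup_cons.mp hcons).1
      have hndr : (rest.map Prod.fst).Nodup := (List.nodup_cons.mp hcons).2
      have hothr : "Others" ∉ rest.map Prod.fst := by
        intro h; exact hoth (by simp [h])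
      have hro : r ≠ "Others" := by
        intro h; exact hoth (by simp [h])
      simp only [sieveAux]
      rw [List.filter_map, List.filter_map, List.map_map, ih _ hndr hothr]
      congr 1
      · -- head bucket
        congr 1
        have h1 : List.map (Prod.fst ∘ fun g => (g, PySem.Str.lower g))
            (List.filter ((fun p : String × String => kwHit kws p.2) ∘ fun g => (g, PySem.Str.lower g)) rem)
            = List.filter (fun g => kwHit kws (PySem.Str.lower g)) rem := by
          rw [show (Prod.fst ∘ fun g : String => (g, PySem.Str.lower g)) = id from rfl, List.map_id]
          rfl
        rw [h1]
        apply List.filter_congr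
        intro g _
        simp only [regionOfAux]
        by_cases h : kwHit kws (PySem.Str.lower g)
        · simp [h]
        · simp only [h, Bool.false_eq_true, if_false]
          rcases regionOfAux_mem (PySem.Str.lower g) rest with h' | h'
          · simp [h', Ne.symm hro]
          · have : regionOfAux (PySem.Str.lower g) rest ≠ r := by
              intro he; exact hrrest (he ▸ h')
            simp [this]
      · -- tail buckets + Others
        congr 1
        · apply List.map_congr_left
          intro rk' hrk'
          have hne : rk'.1 ≠ r := by
            intro he; exact hrrest (he ▸ (List.mem_map.mpr ⟨rk', hrk', rfl⟩))
          congr 1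
          rw [List.filter_filter]
          apply List.filter_congr
          intro g _
          simp only [Function.comp, regionOfAux]
          by_cases h : kwHit kws (PySem.Str.lower g) <;> simp [h, Ne.symm hne]
        · rw [List.filter_filter]
          refine congrArg (fun l => [("Others", l)]) (List.filter_congr ?_)
          intro g _
          simp only [Function.comp, regionOfAux]
          by_cases h : kwHit kws (PySem.Str.lower g) <;> simp [h, hro]

theorem alt_eq (games : List String) :
    classify_by_region_py_alt games =
      [("World", games.filter (fun g => regionOf g == "World")),
       ("USA", games.filter (fun g => regionOf g == "USA")),
       ("Europe", games.filter (fun g => regionOf g == "Europe")),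
       ("Japan", games.filter (fun g => regionOf g == "Japan")),
       ("Taiwan", games.filter (fun g => regionOf g == "Taiwan")),
       ("Hong Kong", games.filter (fun g => regionOf g == "Hong Kong")),
       ("Korea", games.filter (fun g => regionOf g == "Korea")),
       ("Asia", games.filter (fun g => regionOf g == "Asia")),
       ("China", games.filter (fun g => regionOf g == "China")),
       ("Others", games.filter (fun g => regionOf g == "Others"))] := by
  unfold classify_by_region_py_alt
  rw [sieve_spec sieveTable games (by decide) (by decide)]
  simp [sieveTable, keyOrder, regionOf, List.find?]

-- ===== VERDICT (by name: the statement is the Claim_ definition above) =====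
theorem classify_by_region_py_spec : Claim_equal_classify_by_region_py := by
  intro games _
  unfold Spec_classify_by_region_py
  show (games.foldl stepA (mkRegions [] [] [] [] [] [] [] [] [] [])).items = _
  rw [classify_inv, alt_eq]
  simp
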